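-- pv_equiv track=rewrite | github.com/sp98/Prgramming | Interview_Programs/sub.py | missingWords
-- ===== SOURCE A (Python) =====
-- def  missingWords(s, t):
--     s_list = s.split(" ")
--     t_list = t.split(" ")
--     sub_seq_list = []
--     for s in s_list:
--         sub_seq_list = sub_seq_list + find_sequence(s)
--     for x in t_list:
--         if x in sub_seq_list:
--             s_list.remove(x)
--
--     return s_list
--
-- def find_sequence(s):
--     length = len(s)+1
--     x = [s[x:y] for x in range(length) for y in range(length) if s[x:y]]
--     return x
-- ===== SOURCE B (Python) =====
-- def missingWords(s, t):
--     s_list = s.split(" ")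
--     for x in t.split(" "):
--         if x and any(x in word for word in s_list):
--             s_list.remove(x)
--     return s_list
-- ===== Notes on version B (the rewrite author's own statement) =====
-- stated objective: faster
-- what changed: B drops the precomputed table of all substrings of all s-words (and the table-building loop) and instead tests each t-word directly as a substring of the current s-words with any(x in word ...), removing it as A does.
import Mathlib
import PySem

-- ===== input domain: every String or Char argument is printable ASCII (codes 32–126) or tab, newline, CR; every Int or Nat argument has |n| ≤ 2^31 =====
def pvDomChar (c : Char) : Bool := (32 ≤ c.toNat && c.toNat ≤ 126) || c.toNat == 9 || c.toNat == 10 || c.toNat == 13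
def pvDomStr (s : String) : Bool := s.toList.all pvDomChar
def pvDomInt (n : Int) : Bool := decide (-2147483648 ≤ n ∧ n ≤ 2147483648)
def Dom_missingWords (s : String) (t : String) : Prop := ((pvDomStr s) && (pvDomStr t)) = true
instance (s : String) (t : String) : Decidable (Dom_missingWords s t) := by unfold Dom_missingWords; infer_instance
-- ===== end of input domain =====

-- B replaces A's precomputed table of all substrings of all s-words by a direct
-- substring test per t-word (faster: no quadratic-size table is built or scanned).
-- ===== PORT A =====
-- find_sequence(s): all nonempty slices s[x:y]
def findSequence (s : String) : List String :=
  let length : Int := (PySem.Str.len s : Int) + 1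
  (PySem.List.pyRange 0 length 1).flatMap (fun x =>
    (PySem.List.pyRange 0 length 1).flatMap (fun y =>
      let sub := PySem.Str.slice s (some x) (some y)
      if sub ≠ "" then [sub] else []))

-- the second loop's body; `none` marks the ValueError of list.remove (excluded by Pre_)
def missingWords (s : String) (t : String) : List String :=
  let sList := (PySem.Str.split? s " ").getD []
  let tList := (PySem.Str.split? t " ").getD []
  let subSeqList := sList.foldl (fun acc w => acc ++ findSequence w) []
  let res := tList.foldl
    (fun (st : Option (List String)) x =>
      st.bind (fun l => if x ∈ subSeqList then PySem.List.remove? l x else some l))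
    (some sList)
  res.getD []

-- ===== PORT B =====
def missingWords_alt (s : String) (t : String) : List String :=
  let sList := (PySem.Str.split? s " ").getD []
  let res := ((PySem.Str.split? t " ").getD []).foldl
    (fun (st : Option (List String)) x =>
      st.bind (fun l =>
        if x ≠ "" ∧ l.any (fun w => PySem.Str.isIn x w) then PySem.List.remove? l x else some l))
    (some sList)
  res.getD []

-- ===== PRECONDITION & SPEC =====
-- Pre_ excludes exactly the inputs where A raises ValueError: some nonempty t-word that is a
-- substring of an s-word occurs in t's word list more often than as an exact word of s's list.
def Pre_missingWords (s : String) (t : String) : Prop :=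
  ∀ x ∈ (PySem.Str.split? t " ").getD [],
    x ≠ "" →
    (∃ w ∈ (PySem.Str.split? s " ").getD [], x.toList <:+: w.toList) →
    ((PySem.Str.split? t " ").getD []).count x ≤ ((PySem.Str.split? s " ").getD []).count x

instance (s : String) (t : String) : Decidable (Pre_missingWords s t) := by
  unfold Pre_missingWords; infer_instance

def pvWitness_missingWords : String × String := ("the cat sat", "cat dog")

def Spec_missingWords (s : String) (t : String) (out : List String) : Prop := out = missingWords_alt s t
instance (s : String) (t : String) (out : List String) : Decidable (Spec_missingWords s t out) := by unfold Spec_missingWords; infer_instance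

-- ===== CLAIM (what is proved, stated in full; the proofs are below) =====
def Claim_equal_missingWords : Prop := ∀ (s : String) (t : String), Dom_missingWords s t → Pre_missingWords s t → Spec_missingWords s t (missingWords s t)

-- ===== LEMMAS AND PROOFS =====

-- membership in find_sequence s = nonempty infix of s
theorem mem_findSequence (s : String) (x : String) :
    x ∈ findSequence s ↔ x ≠ "" ∧ x.toList <:+: s.toList := by
  unfold findSequence
  simp only [List.mem_flatMap, PySem.List.mem_pyRange_one]
  constructor
  · rintro ⟨a, ⟨ha0, ha1⟩, b, ⟨hb0, hb1⟩, hx⟩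
    by_cases hne : PySem.Str.slice s (some a) (some b) = ""
    · simp [hne] at hx
    · simp [hne] at hx
      subst hx
      refine ⟨hne, ?_⟩
      have : (PySem.Str.slice s (some a) (some b)).toList
          = (s.toList.drop a.toNat).take (b.toNat - a.toNat) := by
        rw [PySem.Str.toList_slice, PySem.Chars.slice_eq_listSlice]
        exact PySem.List.slice_toNat _ ha0 hb0
      rw [this]
      exact ((s.toList.drop a.toNat).take_prefix _).isInfix.trans
        (s.toList.drop_suffix a.toNat).isInfix
  · rintro ⟨hne, pre, suf, hsplit⟩
    have hlen : pre.length + (x.toList.length + suf.length) = s.toList.length := by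
      rw [← hsplit]; simp
    refine ⟨(pre.length : Int), ?_, ((pre.length : Int) + (x.toList.length : Int)), ?_, ?_⟩
    · exact ⟨by positivity, by rw [PySem.Str.len_eq]; omega⟩
    · refine ⟨by positivity, by rw [PySem.Str.len_eq]; omega⟩
    · have hslice : (PySem.Str.slice s (some (pre.length : Int))
          (some ((pre.length : Int) + (x.toList.length : Int)))).toList = x.toList := by
        rw [PySem.Str.toList_slice, PySem.Chars.slice_eq_listSlice,
          PySem.List.slice_natCast_add, ← hsplit]
        simp [List.append_assoc]
      have hstr : PySem.Str.slice s (some (pre.length : Int))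
          (some ((pre.length : Int) + (x.toList.length : Int))) = x :=
        String.toList_inj.mp hslice
      rw [hstr]
      simp [hne]

-- membership in the substring table
theorem mem_subSeqList (sl : List String) (x : String) :
    x ∈ sl.foldl (fun acc w => acc ++ findSequence w) [] ↔
      x ≠ "" ∧ ∃ w ∈ sl, x.toList <:+: w.toList := by
  rw [PySem.List.foldl_append_eq_flatMap]
  simp only [List.nil_append, List.mem_flatMap, mem_findSequence]
  constructor
  · rintro ⟨w, hw, hne, hinf⟩; exact ⟨hne, w, hw, hinf⟩
  · rintro ⟨hne, w, hw, hinf⟩; exact ⟨w, hw, hne, hinf⟩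

-- the two folds agree under the counting invariant
theorem loop_eq (s0 : List String) (ts : List String) (l : List String)
    (hsub : List.Sublist l s0)
    (hcnt : ∀ y : String, y ≠ "" → (∃ w ∈ s0, y.toList <:+: w.toList) →
      ts.count y ≤ l.count y) :
    ts.foldl
      (fun (st : Option (List String)) x =>
        st.bind (fun l => if x ∈ s0.foldl (fun acc w => acc ++ findSequence w) []
          then PySem.List.remove? l x else some l)) (some l)
    = ts.foldl
      (fun (st : Option (List String)) x =>
        st.bind (fun l =>
          if x ≠ "" ∧ l.any (fun w => PySem.Str.isIn x w) then PySem.List.remove? l x else some l))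
      (some l) := by
  induction ts generalizing l with
  | nil => rfl
  | cons x ts ih =>
    simp only [List.foldl_cons, Option.bind_some]
    by_cases hx : x ∈ s0.foldl (fun acc w => acc ++ findSequence w) []
    · obtain ⟨hne, hwit⟩ := (mem_subSeqList s0 x).mp hx
      have hxl : x ∈ l := by
        have h1 := hcnt x hne hwit
        have h2 : 0 < (x :: ts).count x := by simp
        exact List.count_pos_iff.mp (lt_of_lt_of_le h2 h1)
      have hany : l.any (fun w => PySem.Str.isIn x w) = true := by
        refine List.any_eq_true.mpr ⟨x, hxl, ?_⟩
        exact (PySem.Str.isIn_iff_infix _ _).mpr List.infix_rfl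
      rw [if_pos hx, if_pos ⟨hne, hany⟩, PySem.List.remove?_eq_some_erase l x hxl]
      refine ih (l.erase x) ((List.erase_sublist).trans hsub) ?_
      intro y hy hw
      by_cases hyx : y = x
      · subst hyx
        have h1 := hcnt y hy hw
        have h2 : (y :: ts).count y = ts.count y + 1 := by simp
        have h3 : (l.erase y).count y = l.count y - 1 := List.count_erase_self
        have h4 : 0 < l.count y := List.count_pos_iff.mpr hxl
        omega
      · have h1 := hcnt y hy hw
        have h2 : (x :: ts).count y = ts.count y := by simp [Ne.symm hyx]
        have h3 : (l.erase x).count y = l.count y := List.count_erase_of_ne hyx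
        omega
    · have hB : ¬ (x ≠ "" ∧ l.any (fun w => PySem.Str.isIn x w) = true) := by
        rintro ⟨hne, hany⟩
        obtain ⟨w, hwl, hin⟩ := List.any_eq_true.mp hany
        exact hx ((mem_subSeqList s0 x).mpr
          ⟨hne, w, hsub.subset hwl, (PySem.Str.isIn_iff_infix _ _).mp hin⟩)
      rw [if_neg hx, if_neg hB]
      refine ih l hsub ?_
      intro y hy hw
      exact le_trans ((List.sublist_cons_self x ts).count_le y) (hcnt y hy hw)

-- ===== VERDICT (by name: the statement is the Claim_ definition above) =====
theorem missingWords_spec : Claim_equal_missingWords := by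
  intro s t _ hpre
  unfold Spec_missingWords missingWords missingWords_alt
  simp only []
  exact congrArg (Option.getD · []) (loop_eq _ _ _ (List.Sublist.refl _)
    (by
      intro y hy hw
      by_cases hmem : y ∈ (PySem.Str.split? t " ").getD []
      · exact hpre y hmem hy hw
      · simp [List.count_eq_zero_of_not_mem hmem]))
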